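-- pv_equiv track=rewrite | github.com/gissemari/PeruvianSignLanguage | 5.Preparation/utils/LoadData.py | ReduceDataToMinimunSize
-- ===== SOURCE A (Python) =====
-- from collections import Counter
--
-- def ReduceDataToMinimunSize(x, y):
--
--     # to count repeated targets in y
--     targetDict = dict(Counter(y))
--
--     # get the least mount of data of all categories
--     minimun = min(targetDict.values())
--
--     newX = []
--     newY = []
--
--     # to set a counter for all categories to the minimun data
--     reverseCounter = dict.fromkeys(targetDict, minimun)
--
--     for index, key in enumerate(y):
--
--         # if reverseCounter is not zero(key)
--         if reverseCounter[key]: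
--
--             newX.append(x[index])
--             newY.append(y[index])
--
--             # to do reverse counter from minimun to zero
--             reverseCounter[key] = reverseCounter[key] - 1
--
--     return newX, newY
-- ===== SOURCE B (Python) =====
-- def ReduceDataToMinimunSize(x, y):
--     # the least amount of data over all categories: min over each position's
--     # category frequency (ValueError on empty y, like A's min over Counter)
--     minimum = min(map(y.count, y))
--
--     # position i is kept iff fewer than `minimum` earlier positions carry the
--     # same label: the kept rows are exactly the first `minimum` of each category
--     keep = [i for i, k in enumerate(y) if y[:i].count(k) < minimum]
--
--     return [x[i] for i in keep], [y[i] for i in keep]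
-- ===== Notes on version B (the rewrite author's own statement) =====
-- stated objective: simpler
-- what changed: Drops all dictionaries and mutable counters: the minimum is min(map(y.count, y)) and a position is kept iff its label's prefix-occurrence count y[:i].count(y[i]) is below that minimum, expressed as three comprehensions (count-based characterisation instead of Counter + a countdown dict mutated in a loop).
import Mathlib
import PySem

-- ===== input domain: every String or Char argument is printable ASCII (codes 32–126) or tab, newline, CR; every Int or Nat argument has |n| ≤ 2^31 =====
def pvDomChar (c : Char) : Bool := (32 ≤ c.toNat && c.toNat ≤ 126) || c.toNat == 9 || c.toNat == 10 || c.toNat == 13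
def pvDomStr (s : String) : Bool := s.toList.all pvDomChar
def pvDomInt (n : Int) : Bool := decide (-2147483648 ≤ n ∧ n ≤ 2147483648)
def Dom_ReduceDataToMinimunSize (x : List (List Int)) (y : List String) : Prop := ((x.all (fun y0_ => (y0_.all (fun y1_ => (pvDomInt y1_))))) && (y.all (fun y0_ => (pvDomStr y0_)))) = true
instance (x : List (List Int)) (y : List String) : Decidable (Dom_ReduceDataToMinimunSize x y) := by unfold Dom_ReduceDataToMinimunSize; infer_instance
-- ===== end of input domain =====

-- B replaces A's Counter + mutable per-category countdown dict by a dict-free, count-based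
-- characterisation: minimum = min(map(y.count, y)) and position i is kept iff
-- y[:i].count(y[i]) < minimum, written as three comprehensions (simpler, not faster).
-- Equivalence of the RETURN value is proved on Pre_.

-- ===== PORT A =====
def ReduceDataToMinimunSize (x : List (List Int)) (y : List String) : List (List Int) × List String :=
  -- targetDict = dict(Counter(y))
  let targetDict : PySem.Dict String Int := PySem.Dict.counter y
  -- minimun = min(targetDict.values())  (raises ValueError on empty y: excluded by Pre_)
  let minimun : Int := (PySem.List.min? targetDict.values (fun v => v)).getD 0
  -- reverseCounter = dict.fromkeys(targetDict, minimun)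
  let reverseCounter : PySem.Dict String Int :=
    targetDict.keys.foldl (fun d k => d.insert k minimun) PySem.Dict.empty
  -- for index, key in enumerate(y): …
  let fin := (y.zipIdx).foldl
    (fun (st : List (List Int) × List String × PySem.Dict String Int) p =>
      if st.2.2.getD p.1 0 ≠ 0 then
        (st.1 ++ [(PySem.List.pyGet? x ((p.2 : Int))).getD []],
         st.2.1 ++ [(PySem.List.pyGet? y ((p.2 : Int))).getD ""],
         st.2.2.insert p.1 (st.2.2.getD p.1 0 - 1))
      else st)
    ([], [], reverseCounter)
  (fin.1, fin.2.1)

-- ===== PORT B =====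
def ReduceDataToMinimunSize_alt (x : List (List Int)) (y : List String) : List (List Int) × List String :=
  -- minimum = min(map(y.count, y))  (ValueError on empty y: excluded by Pre_)
  let minimum : Int :=
    (PySem.List.min? (y.map (fun k => ((PySem.List.count y k : Nat) : Int))) (fun v => v)).getD 0
  -- keep = [i for i, k in enumerate(y) if y[:i].count(k) < minimum]
  let keep : List Int :=
    ((PySem.List.enumerate y 0).filter
      (fun p => decide (((PySem.List.count (PySem.List.slice y none (some p.1)) p.2 : Nat) : Int) < minimum))).map
      (fun p => p.1)
  -- return [x[i] for i in keep], [y[i] for i in keep]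
  (keep.map (fun i => (PySem.List.pyGet? x i).getD []),
   keep.map (fun i => (PySem.List.pyGet? y i).getD ""))

-- ===== PRECONDITION & SPEC =====
-- Pre_ excludes empty y, on which A raises ValueError (min of no values), and inputs with fewer
-- x rows than y labels, on which A raises IndexError as soon as a kept position reaches past x
-- (on the rare such inputs whose kept positions all stay inside x, A returns and B returns the same).
def Pre_ReduceDataToMinimunSize (x : List (List Int)) (y : List String) : Prop :=
  y ≠ [] ∧ y.length ≤ x.length
instance (x : List (List Int)) (y : List String) : Decidable (Pre_ReduceDataToMinimunSize x y) := by
  unfold Pre_ReduceDataToMinimunSize; infer_instance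

def pvWitness_ReduceDataToMinimunSize : List (List Int) × List String :=
  ([[1], [2], [3]], ["a", "b", "a"])

def Spec_ReduceDataToMinimunSize (x : List (List Int)) (y : List String) (out : List (List Int) × List String) : Prop := out = ReduceDataToMinimunSize_alt x y
instance (x : List (List Int)) (y : List String) (out : List (List Int) × List String) : Decidable (Spec_ReduceDataToMinimunSize x y out) := by unfold Spec_ReduceDataToMinimunSize; infer_instance

-- ===== CLAIM (what is proved, stated in full; the proofs are below) =====
def Claim_equal_ReduceDataToMinimunSize : Prop := ∀ (x : List (List Int)) (y : List String), Dom_ReduceDataToMinimunSize x y → Pre_ReduceDataToMinimunSize x y → Spec_ReduceDataToMinimunSize x y (ReduceDataToMinimunSize x y)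

-- ===== LEMMAS AND PROOFS =====

-- A's min over Counter values and B's min over per-position counts agree (same set of values),
-- and that value is at least 1 on nonempty y.
lemma pvCounterValues (y : List String) :
    (PySem.Dict.counter y).values = (PySem.Set.ofList y).map (fun k => ((y.count k : Int))) := by
  have hv : (PySem.Dict.counter y).values = (PySem.Dict.counter y).items.map (fun p => p.2) := rfl
  rw [hv, PySem.Dict.items_counter, List.map_map]; rfl

lemma pvMin_eq (y : List String) (hy : y ≠ []) :
    ∃ m : Int, PySem.List.min? (PySem.Dict.counter y).values (fun v => v) = some m ∧
      PySem.List.min? (y.map (fun k => ((PySem.List.count y k : Nat) : Int))) (fun v => v) = some m ∧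
      1 ≤ m := by
  have hmemA : ∀ v, v ∈ (PySem.Dict.counter y).values ↔ ∃ k ∈ y, ((y.count k : Int)) = v := by
    intro v
    rw [pvCounterValues, List.mem_map]
    constructor
    · rintro ⟨k, hk, rfl⟩; exact ⟨k, (PySem.Set.mem_ofList _ _).mp hk, rfl⟩
    · rintro ⟨k, hk, rfl⟩; exact ⟨k, (PySem.Set.mem_ofList _ _).mpr hk, rfl⟩
  have hmemB : ∀ v, v ∈ y.map (fun k => ((PySem.List.count y k : Nat) : Int)) ↔
      ∃ k ∈ y, ((y.count k : Int)) = v := by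
    intro v
    rw [List.mem_map]
    simp [PySem.List.count_eq]
  obtain ⟨a, as, rfl⟩ : ∃ a as, y = a :: as := by
    cases y with
    | nil => exact absurd rfl hy
    | cons a as => exact ⟨a, as, rfl⟩
  obtain ⟨mA, hA⟩ : ∃ mA, PySem.List.min? (PySem.Dict.counter (a :: as)).values (fun v => v) = some mA := by
    rcases h : PySem.List.min? (PySem.Dict.counter (a :: as)).values (fun v => v) with _ | mA
    · rw [PySem.List.min?_eq_none_iff] at h
      have : ((a :: as).count a : Int) ∈ (PySem.Dict.counter (a :: as)).values :=
        (hmemA _).mpr ⟨a, List.mem_cons_self, rfl⟩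
      rw [h] at this; simp at this
    · exact ⟨mA, rfl⟩
  obtain ⟨mB, hB⟩ : ∃ mB, PySem.List.min? ((a :: as).map (fun k => ((PySem.List.count (a :: as) k : Nat) : Int))) (fun v => v) = some mB := by
    rcases h : PySem.List.min? ((a :: as).map (fun k => ((PySem.List.count (a :: as) k : Nat) : Int))) (fun v => v) with _ | mB
    · rw [PySem.List.min?_eq_none_iff] at h; simp at h
    · exact ⟨mB, rfl⟩
  have hAB : mA = mB := by
    obtain ⟨kA, hkA, hvA⟩ := (hmemA mA).mp (PySem.List.min?_mem hA)
    obtain ⟨kB, hkB, hvB⟩ := (hmemB mB).mp (PySem.List.min?_mem hB)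
    have h1 : mB ≤ mA := PySem.List.min?_isMin hB mA ((hmemB mA).mpr ⟨kA, hkA, hvA⟩)
    have h2 : mA ≤ mB := PySem.List.min?_isMin hA mB ((hmemA mB).mpr ⟨kB, hkB, hvB⟩)
    omega
  refine ⟨mA, hA, hAB ▸ hB, ?_⟩
  obtain ⟨kA, hkA, hvA⟩ := (hmemA mA).mp (PySem.List.min?_mem hA)
  have := List.count_pos_iff.mpr hkA
  omega

-- getD of the fromkeys fold
lemma pvGetD_fromkeys (ks : List String) (m : Int) (d : PySem.Dict String Int) (k : String) :
    (ks.foldl (fun d k' => d.insert k' m) d).getD k 0 = if k ∈ ks then m else d.getD k 0 := by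
  induction ks generalizing d with
  | nil => simp
  | cons a ks ih =>
    simp only [List.foldl_cons, ih, PySem.Dict.getD_insert, List.mem_cons]
    by_cases h : k ∈ ks
    · simp [h]
    · by_cases h2 : k = a <;> simp [h, h2]

-- a pair-accumulating conditional-append fold is a filter-then-map, componentwise
lemma pvFoldPair {α β γ : Type} (P : α → Prop) [DecidablePred P] (f : α → β) (g : α → γ) :
    ∀ (l : List α) (accB : List β) (accC : List γ),
    l.foldl (fun (st : List β × List γ) p => if P p then (st.1 ++ [f p], st.2 ++ [g p]) else st) (accB, accC)
      = (accB ++ (l.filter (fun p => decide (P p))).map f,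
         accC ++ (l.filter (fun p => decide (P p))).map g) := by
  intro l
  induction l with
  | nil => intro accB accC; simp
  | cons a t ih =>
    intro accB accC
    by_cases h : P a <;> simp [h, ih]

-- ===== the main loop equivalence =====
-- A's countdown loop, with reverseCounter carrying max 0 (m - <count so far>) per key,
-- equals the fold that keeps position n iff the prefix count of its label is below m.
lemma pvLoop (x : List (List Int)) (Y : List String) (m : Int) :
    ∀ (ys : List String) (n : Nat) (rc : PySem.Dict String Int)
      (accX : List (List Int)) (accY : List String),
      Y.drop n = ys →
      (∀ k ∈ ys, rc.getD k 0 = max 0 (m - ((Y.take n).count k : Int))) →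
      (let r := (ys.zipIdx n).foldl
        (fun (st : List (List Int) × List String × PySem.Dict String Int) p =>
          if st.2.2.getD p.1 0 ≠ 0 then
            (st.1 ++ [(PySem.List.pyGet? x ((p.2 : Int))).getD []],
             st.2.1 ++ [(PySem.List.pyGet? Y ((p.2 : Int))).getD ""],
             st.2.2.insert p.1 (st.2.2.getD p.1 0 - 1))
          else st) (accX, accY, rc)
       (r.1, r.2.1))
      = (ys.zipIdx n).foldl
          (fun (st : List (List Int) × List String) p =>
            if (((Y.take p.2).count p.1 : Int)) < m then
              (st.1 ++ [(PySem.List.pyGet? x ((p.2 : Int))).getD []],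
               st.2 ++ [(PySem.List.pyGet? Y ((p.2 : Int))).getD ""])
            else st) (accX, accY) := by
  intro ys
  induction ys with
  | nil => intro n rc accX accY _ _; simp
  | cons a ys ih =>
    intro n rc accX accY hdrop hrc
    have h0 : Y[n]? = some a := by
      have := congrArg (fun l => l[0]?) hdrop
      simpa [List.getElem?_drop] using this
    have hn : n < Y.length := by
      rcases List.getElem?_eq_some_iff.mp h0 with ⟨h, _⟩; exact h
    have hdrop' : Y.drop (n+1) = ys := by
      have : Y.drop (n+1) = (Y.drop n).tail := by rw [List.tail_drop]
      rw [this, hdrop]; rfl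
    have hcount : ∀ k, (Y.take (n+1)).count k
        = (Y.take n).count k + (if a = k then 1 else 0) := by
      intro k
      rw [List.take_add_one, List.count_append, List.getElem?_eq_getElem hn]
      have hYn : Y[n] = a := by
        have := h0; rw [List.getElem?_eq_getElem hn] at this
        exact Option.some.inj this
      simp [hYn, List.count_singleton, beq_iff_eq]
    have hrcA : rc.getD a 0 = max 0 (m - ((Y.take n).count a : Int)) :=
      hrc a (List.mem_cons_self)
    have hcond : (rc.getD a 0 ≠ 0) ↔ (((Y.take n).count a : Int)) < m := by
      rw [hrcA]; omega
    rw [List.zipIdx_cons, List.foldl_cons, List.foldl_cons]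
    by_cases hc : rc.getD a 0 ≠ 0
    · rw [if_pos hc, if_pos (hcond.mp hc)]
      apply ih (n+1) _ _ _ hdrop'
      intro k hkmem
      rw [PySem.Dict.getD_insert]
      by_cases hka : k = a
      · subst hka
        rw [if_pos rfl, hrcA, hcount k, if_pos rfl]
        have : ((Y.take n).count k : Int) < m := hcond.mp hc
        push_cast
        omega
      · rw [if_neg hka, hrc k (List.mem_cons_of_mem a hkmem), hcount k,
          if_neg (fun h => hka h.symm)]
        simp
    · rw [if_neg hc]
      have hnot : ¬ (((Y.take n).count a : Int)) < m := fun h => hc (hcond.mpr h)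
      rw [if_neg hnot]
      apply ih (n+1) _ _ _ hdrop'
      intro k hkmem
      rw [hrc k (List.mem_cons_of_mem a hkmem), hcount k]
      by_cases hka : a = k
      · subst hka
        rw [if_pos rfl]
        push_cast
        omega
      · rw [if_neg hka]; simp

-- ===== VERDICT (by name: the statement is the Claim_ definition above) =====
theorem ReduceDataToMinimunSize_spec : Claim_equal_ReduceDataToMinimunSize := by
  intro x y _hdom hpre
  obtain ⟨hy, _hlen⟩ := hpre
  obtain ⟨m, hA, hB, hm1⟩ := pvMin_eq y hy
  unfold Spec_ReduceDataToMinimunSize ReduceDataToMinimunSize ReduceDataToMinimunSize_alt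
  dsimp only
  rw [hA, hB]
  simp only [Option.getD_some]
  -- initial reverse counter satisfies the loop invariant
  have hrc0 : ∀ k ∈ y,
      ((PySem.Dict.counter y).keys.foldl (fun d k' => d.insert k' m) PySem.Dict.empty).getD k 0
        = max 0 (m - ((y.take 0).count k : Int)) := by
    intro k hk
    rw [pvGetD_fromkeys, PySem.Dict.keys_counter, if_pos ((PySem.Set.mem_ofList _ _).mpr hk)]
    simp
    omega
  have hloop := pvLoop x y m y 0
    ((PySem.Dict.counter y).keys.foldl (fun d k' => d.insert k' m) PySem.Dict.empty)
    [] [] (by simp) hrc0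
  simp only at hloop
  rw [hloop]
  -- the kept-position fold is a filter-then-map
  rw [pvFoldPair (fun p : String × Nat => (((y.take p.2).count p.1 : Int)) < m)
      (fun p => (PySem.List.pyGet? x ((p.2 : Int))).getD [])
      (fun p => (PySem.List.pyGet? y ((p.2 : Int))).getD "") (y.zipIdx) [] []]
  -- and B's comprehension is the same filter-then-map
  simp [PySem.List.enumerate_eq_zipIdx_map, List.filter_map, List.map_map, Function.comp_def,
    PySem.List.slice_to_natCast, PySem.List.count_eq]
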